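-- pv_equiv track=rewrite | github.com/oThommy/advent-of-code | 2021/4/challenge_2.py | validate_bingo_card
-- ===== SOURCE A (Python) =====
-- def validate_bingo_card(bingo_card):
--     # horizontal checks
--     for line in bingo_card:
--         marked_lst = [marked for _, marked in line]
--         if (all(marked_lst)):
--             return True, sum_unmarked_nums(bingo_card)
--
--     # vertical checks
--     for j in range(5):
--         bingo_flag = True
--         for i in range(5):
--             _, marked = bingo_card[i][j]
--             if (not marked):
--                 bingo_flag = False
--                 break
--         if bingo_flag:
--             return True, sum_unmarked_nums(bingo_card)
--
--     return False, 0
--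
-- def sum_unmarked_nums(bingo_card):
--     num_sum = 0
--     for i in range(5):
--         for j in range(5):
--             num, marked = bingo_card[i][j]
--             if (marked == False):
--                 num_sum += num
--     return num_sum
-- ===== SOURCE B (Python) =====
-- def validate_bingo_card(bingo_card):
--     row_marks = [0] * 5
--     col_marks = [0] * 5
--     unmarked_sum = 0
--     for i in range(5):
--         for j in range(5):
--             num, marked = bingo_card[i][j]
--             row_marks[i] += marked
--             col_marks[j] += marked
--             if not marked:
--                 unmarked_sum += num
--     if 5 in row_marks or 5 in col_marks:
--         return True, unmarked_sum
--     return False, 0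
-- ===== Notes on version B (the rewrite author's own statement) =====
-- stated objective: alternative
-- what changed: Replaced A's two separate passes (row all()-scan with early return, then a nested column scan with a break flag, plus a separate full-board unmarked-sum pass) by one uniform sweep over the 25 cells that maintains per-row and per-column mark counters and the unmarked sum simultaneously.
import Mathlib
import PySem

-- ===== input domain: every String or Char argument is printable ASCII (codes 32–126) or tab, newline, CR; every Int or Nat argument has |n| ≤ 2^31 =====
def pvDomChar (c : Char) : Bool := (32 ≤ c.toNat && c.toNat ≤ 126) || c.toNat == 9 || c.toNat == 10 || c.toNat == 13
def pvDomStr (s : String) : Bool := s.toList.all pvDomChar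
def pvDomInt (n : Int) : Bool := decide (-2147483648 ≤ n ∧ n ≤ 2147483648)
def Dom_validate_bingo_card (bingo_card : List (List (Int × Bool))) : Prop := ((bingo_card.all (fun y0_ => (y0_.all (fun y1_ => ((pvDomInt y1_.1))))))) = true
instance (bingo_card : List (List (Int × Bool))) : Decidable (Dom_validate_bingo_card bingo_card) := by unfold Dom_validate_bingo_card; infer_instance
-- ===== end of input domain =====

-- B replaces A's three passes (row scan, column scan, unmarked-sum pass) with one counting
-- sweep over the 25 cells; same result on every 5×5 card (the objective is 'alternative').

-- ===== PORT A =====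
-- sum_unmarked_nums: nested for i/j over range(5), adding num when marked == False
def pvSumUnmarked (card : List (List (Int × Bool))) : Int :=
  (PySem.List.pyRange 0 5 1).foldl (fun s i =>
    (PySem.List.pyRange 0 5 1).foldl (fun s j =>
      let cell := PySem.List.pyGetD (PySem.List.pyGetD card i []) j (0, false)
      if cell.2 == false then s + cell.1 else s) s) 0

-- inner 'for i in range(5)' with the break: returns bingo_flag
def pvVertInner (card : List (List (Int × Bool))) (j : Int) : List Int → Bool
  | [] => true
  | i :: rest =>
    let cell := PySem.List.pyGetD (PySem.List.pyGetD card i []) j (0, false)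
    if !cell.2 then false else pvVertInner card j rest

-- 'for j in range(5)' with the early return
def pvVertOuter (card : List (List (Int × Bool))) : List Int → Bool × Int
  | [] => (false, 0)
  | j :: rest =>
    if pvVertInner card j (PySem.List.pyRange 0 5 1) then (true, pvSumUnmarked card)
    else pvVertOuter card rest

-- 'for line in bingo_card' with the early return
def pvHoriz (card : List (List (Int × Bool))) : List (List (Int × Bool)) → Bool × Int
  | [] => pvVertOuter card (PySem.List.pyRange 0 5 1)
  | line :: rest =>
    if (line.map Prod.snd).all id then (true, pvSumUnmarked card) else pvHoriz card rest

def validate_bingo_card (bingo_card : List (List (Int × Bool))) : Bool × Int :=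
  pvHoriz bingo_card bingo_card

-- ===== PORT B =====
-- single sweep: for i/j in range(5), maintain row_marks, col_marks, unmarked_sum
def validate_bingo_card_alt (bingo_card : List (List (Int × Bool))) : Bool × Int :=
  let st := (PySem.List.pyRange 0 5 1).foldl (fun st i =>
    (PySem.List.pyRange 0 5 1).foldl (fun st j =>
      let cell := PySem.List.pyGetD (PySem.List.pyGetD bingo_card i []) j (0, false)
      let b : Int := cond cell.2 1 0                  -- bool arithmetic: marked adds 1
      let rm := PySem.List.pySetD st.1 i (PySem.List.pyGetD st.1 i 0 + b)
      let cm := PySem.List.pySetD st.2.1 j (PySem.List.pyGetD st.2.1 j 0 + b)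
      let s := if !cell.2 then st.2.2 + cell.1 else st.2.2
      (rm, cm, s)) st)
    (([0, 0, 0, 0, 0] : List Int), ([0, 0, 0, 0, 0] : List Int), (0 : Int))
  if st.1.contains 5 || st.2.1.contains 5 then (true, st.2.2) else (false, 0)

-- ===== PRECONDITION & SPEC =====
-- Pre_ restricts to genuine 5×5 bingo cards (the function's natural domain): on smaller
-- cards A raises IndexError, and on larger cards A's value mixes an all-rows horizontal
-- scan with a first-5×5-only vertical/sum scan — an accident of its fixed range(5) loops.
def Pre_validate_bingo_card (bingo_card : List (List (Int × Bool))) : Prop :=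
  bingo_card.length = 5 ∧ ∀ r ∈ bingo_card, r.length = 5
instance (bingo_card : List (List (Int × Bool))) : Decidable (Pre_validate_bingo_card bingo_card) := by
  unfold Pre_validate_bingo_card; infer_instance

def pvWitness_validate_bingo_card : (List (List (Int × Bool))) :=
  [[(1, true), (2, true), (3, true), (4, true), (5, true)],
   [(6, false), (7, false), (8, false), (9, false), (10, false)],
   [(1, false), (2, false), (3, false), (4, false), (5, false)],
   [(6, false), (7, false), (8, false), (9, false), (10, false)],
   [(1, false), (2, false), (3, false), (4, false), (5, false)]]

def Spec_validate_bingo_card (bingo_card : List (List (Int × Bool))) (out : Bool × Int) : Prop := out = validate_bingo_card_alt bingo_card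
instance (bingo_card : List (List (Int × Bool))) (out : Bool × Int) : Decidable (Spec_validate_bingo_card bingo_card out) := by unfold Spec_validate_bingo_card; infer_instance

-- ===== CLAIM (what is proved, stated in full; the proofs are below) =====
def Claim_equal_validate_bingo_card : Prop := ∀ (bingo_card : List (List (Int × Bool))), Dom_validate_bingo_card bingo_card → Pre_validate_bingo_card bingo_card → Spec_validate_bingo_card bingo_card (validate_bingo_card bingo_card)

-- ===== LEMMAS AND PROOFS =====

-- shape: a list of length 5 is a literal quintuple
theorem pvLen5 {α : Type} (xs : List α) (h : xs.length = 5) :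
    ∃ a b c d e, xs = [a, b, c, d, e] := by
  rcases xs with _ | ⟨a, _ | ⟨b, _ | ⟨c, _ | ⟨d, _ | ⟨e, _ | ⟨f, t⟩⟩⟩⟩⟩⟩ <;> simp_all

-- Python indexing / assignment on a literal 5-list at literal indices 0..4
theorem pvG0 {α : Type} (x0 x1 x2 x3 x4 d : α) : PySem.List.pyGetD [x0,x1,x2,x3,x4] 0 d = x0 := rfl
theorem pvG1 {α : Type} (x0 x1 x2 x3 x4 d : α) : PySem.List.pyGetD [x0,x1,x2,x3,x4] 1 d = x1 := rfl
theorem pvG2 {α : Type} (x0 x1 x2 x3 x4 d : α) : PySem.List.pyGetD [x0,x1,x2,x3,x4] 2 d = x2 := rfl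
theorem pvG3 {α : Type} (x0 x1 x2 x3 x4 d : α) : PySem.List.pyGetD [x0,x1,x2,x3,x4] 3 d = x3 := rfl
theorem pvG4 {α : Type} (x0 x1 x2 x3 x4 d : α) : PySem.List.pyGetD [x0,x1,x2,x3,x4] 4 d = x4 := rfl
theorem pvS0 {α : Type} (x0 x1 x2 x3 x4 v : α) : PySem.List.pySetD [x0,x1,x2,x3,x4] 0 v = [v,x1,x2,x3,x4] := rfl
theorem pvS1 {α : Type} (x0 x1 x2 x3 x4 v : α) : PySem.List.pySetD [x0,x1,x2,x3,x4] 1 v = [x0,v,x2,x3,x4] := rfl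
theorem pvS2 {α : Type} (x0 x1 x2 x3 x4 v : α) : PySem.List.pySetD [x0,x1,x2,x3,x4] 2 v = [x0,x1,v,x3,x4] := rfl
theorem pvS3 {α : Type} (x0 x1 x2 x3 x4 v : α) : PySem.List.pySetD [x0,x1,x2,x3,x4] 3 v = [x0,x1,x2,v,x4] := rfl
theorem pvS4 {α : Type} (x0 x1 x2 x3 x4 v : α) : PySem.List.pySetD [x0,x1,x2,x3,x4] 4 v = [x0,x1,x2,x3,v] := rfl

-- keep the running sum linear: 'if c then s + n else s' = 's + (if c then n else 0)'
theorem pvIteAdd (c : Prop) [Decidable c] (s n : Int) :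
    (if c then s + n else s) = s + (if c then n else 0) := by split_ifs <;> simp

-- the break-loop of A's vertical check, one step
theorem pvChain (m X : Bool) : (if m = false then false else X) = (m && X) := by
  cases m <;> simp

-- a mark-count over five cells equals 5 iff all five cells are marked
theorem pvC5 (b0 b1 b2 b3 b4 : Bool) :
    ((5 : Int) == (0 + cond b0 1 0 + cond b1 1 0 + cond b2 1 0 + cond b3 1 0 + cond b4 1 0))
    = (b0 && (b1 && (b2 && (b3 && b4)))) := by
  cases b0 <;> cases b1 <;> cases b2 <;> cases b3 <;> cases b4 <;> decide

-- collapse an if-cascade whose true branches agree into one disjunction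
theorem pvIfPull {α : Type} (a b : Bool) (v d : α) :
    (if a = true then v else if b = true then v else d) = (if (a || b) = true then v else d) := by
  cases a <;> simp

-- ===== VERDICT (by name: the statement is the Claim_ definition above) =====
theorem validate_bingo_card_spec : Claim_equal_validate_bingo_card := by
  intro card _ hpre
  obtain ⟨hlen, hrow⟩ := hpre
  obtain ⟨r0, r1, r2, r3, r4, rfl⟩ := pvLen5 card hlen
  obtain ⟨⟨n00,m00⟩,⟨n01,m01⟩,⟨n02,m02⟩,⟨n03,m03⟩,⟨n04,m04⟩, rfl⟩ := pvLen5 r0 (hrow r0 (by simp))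
  obtain ⟨⟨n10,m10⟩,⟨n11,m11⟩,⟨n12,m12⟩,⟨n13,m13⟩,⟨n14,m14⟩, rfl⟩ := pvLen5 r1 (hrow r1 (by simp))
  obtain ⟨⟨n20,m20⟩,⟨n21,m21⟩,⟨n22,m22⟩,⟨n23,m23⟩,⟨n24,m24⟩, rfl⟩ := pvLen5 r2 (hrow r2 (by simp))
  obtain ⟨⟨n30,m30⟩,⟨n31,m31⟩,⟨n32,m32⟩,⟨n33,m33⟩,⟨n34,m34⟩, rfl⟩ := pvLen5 r3 (hrow r3 (by simp))
  obtain ⟨⟨n40,m40⟩,⟨n41,m41⟩,⟨n42,m42⟩,⟨n43,m43⟩,⟨n44,m44⟩, rfl⟩ := pvLen5 r4 (hrow r4 (by simp))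
  unfold Spec_validate_bingo_card validate_bingo_card validate_bingo_card_alt
  have hR : PySem.List.pyRange 0 5 1 = [0, 1, 2, 3, 4] := by decide
  simp only [hR, List.foldl, pvHoriz, pvVertOuter, pvVertInner, pvSumUnmarked,
    pvG0, pvG1, pvG2, pvG3, pvG4, pvS0, pvS1, pvS2, pvS3, pvS4, pvIteAdd]
  simp only [List.map_cons, List.map_nil, List.all_cons, List.all_nil, id_eq, Bool.and_true,
    List.contains_cons, List.contains_nil, Bool.or_false, beq_iff_eq, Bool.not_eq_true',
    pvIfPull, Bool.or_assoc]
  simp only [pvChain, pvC5, Bool.and_true]
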